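-- pv_equiv track=rewrite | github.com/hahanbyul/algorithm_study | 2017-04-1W/FENCE.py | make_smaller_fence
-- ===== SOURCE A (Python) =====
-- def make_smaller_fence(fence, height):
--     """
--     ret = self.cache_smaller_array.get(height, None)
--     if ret != None:
--         return ret
--     """
--
--     new_fence = list()
--     is_continuous = False
--
--     for f in fence:
--         if f >= height:
--             new_fence.append(f)
--             is_continuous = True
--         elif is_continuous:
--             new_fence.append(0)
--             is_continuous = False
--
--     # self.cache_smaller_array[height] = new_fence
--     return new_fence
-- ===== SOURCE B (Python) =====
-- from itertools import groupby
--
-- def make_smaller_fence(fence, height):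
--     out = []
--     for i, (tall, run) in enumerate(groupby(fence, key=lambda f: f >= height)):
--         if tall:
--             out.extend(run)
--         elif i > 0:
--             out.append(0)
--     return out
-- ===== Notes on version B (the rewrite author's own statement) =====
-- stated objective: alternative
-- what changed: Replaced the per-element boolean state machine by a run-length decomposition: itertools.groupby splits the fence into maximal tall/short runs, tall runs are emitted whole and each non-leading short run contributes a single 0.
import Mathlib
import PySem

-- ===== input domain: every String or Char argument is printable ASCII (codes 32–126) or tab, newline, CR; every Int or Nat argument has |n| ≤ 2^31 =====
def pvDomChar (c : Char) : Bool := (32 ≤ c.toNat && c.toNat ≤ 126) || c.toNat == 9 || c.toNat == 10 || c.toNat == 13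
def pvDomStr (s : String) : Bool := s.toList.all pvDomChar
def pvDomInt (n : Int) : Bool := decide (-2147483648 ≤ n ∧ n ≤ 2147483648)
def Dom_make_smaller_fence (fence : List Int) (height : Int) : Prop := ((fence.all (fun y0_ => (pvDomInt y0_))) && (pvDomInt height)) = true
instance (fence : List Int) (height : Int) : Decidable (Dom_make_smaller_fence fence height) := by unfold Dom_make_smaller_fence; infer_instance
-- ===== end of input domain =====

-- B replaces A's per-element boolean state machine by a groupby run decomposition (alternative decomposition, same cost).

-- ===== PORT A =====
-- A's loop: state (new_fence, is_continuous), appending at the back.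
def make_smaller_fence (fence : List Int) (height : Int) : List Int :=
  (fence.foldl
    (fun (st : List Int × Bool) f =>
      if f ≥ height then (st.1 ++ [f], true)
      else if st.2 then (st.1 ++ [0], false)
      else (st.1, false))
    ([], false)).1

-- ===== PORT B =====
-- itertools.groupby with key k: maximal runs of consecutive equal keys.
def pvGroupby (k : Int → Bool) : List Int → List (Bool × List Int)
  | [] => []
  | x :: xs =>
      (k x, x :: xs.takeWhile (fun y => k y == k x)) ::
        pvGroupby k (xs.dropWhile (fun y => k y == k x))
termination_by l => l.length
decreasing_by
  exact Nat.lt_succ_of_le (List.length_dropWhile_le _ _)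

def make_smaller_fence_alt (fence : List Int) (height : Int) : List Int :=
  (PySem.List.enumerate (pvGroupby (fun f => f ≥ height) fence) 0).foldl
    (fun out p =>
      if p.2.1 then out ++ p.2.2
      else if p.1 > 0 then out ++ [0]
      else out)
    []

-- ===== PRECONDITION & SPEC =====
def Spec_make_smaller_fence (fence : List Int) (height : Int) (out : List Int) : Prop := out = make_smaller_fence_alt fence height
instance (fence : List Int) (height : Int) (out : List Int) : Decidable (Spec_make_smaller_fence fence height out) := by unfold Spec_make_smaller_fence; infer_instance

-- ===== CLAIM (what is proved, stated in full; the proofs are below) =====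
def Claim_equal_make_smaller_fence : Prop := ∀ (fence : List Int) (height : Int), Dom_make_smaller_fence fence height → Spec_make_smaller_fence fence height (make_smaller_fence fence height)

-- ===== LEMMAS AND PROOFS =====

-- functional form of A's state machine
def pvG (height : Int) : List Int → Bool → List Int
  | [], _ => []
  | f :: rest, c =>
      if f ≥ height then f :: pvG height rest true
      else if c then 0 :: pvG height rest false
      else pvG height rest false

theorem pvA_foldl (height : Int) (fence : List Int) (acc : List Int) (c : Bool) :
    (fence.foldl
      (fun (st : List Int × Bool) f =>
        if f ≥ height then (st.1 ++ [f], true)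
        else if st.2 then (st.1 ++ [0], false)
        else (st.1, false))
      (acc, c)).1 = acc ++ pvG height fence c := by
  induction fence generalizing acc c with
  | nil => simp [pvG]
  | cons f rest ih =>
      by_cases hf : height ≤ f
      · simp [pvG, hf, ih]
      · cases c <;> simp [pvG, hf, ih]

-- run-level processing
def pvGr (rs : List (Bool × List Int)) : List Int :=
  match rs with
  | [] => []
  | (true, run) :: rest => run ++ pvGr rest
  | (false, _) :: rest => 0 :: pvGr rest

theorem pvB_fold_tail (rs : List (Bool × List Int)) (i : Int) (acc : List Int)
    (hi : i > 0) :
    (PySem.List.enumerate rs i).foldl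
      (fun out p =>
        if p.2.1 then out ++ p.2.2
        else if p.1 > 0 then out ++ [0]
        else out)
      acc = acc ++ pvGr rs := by
  induction rs generalizing i acc with
  | nil => simp [PySem.List.enumerate_nil, pvGr]
  | cons r rest ih =>
      obtain ⟨b, run⟩ := r
      cases b <;>
        simp [PySem.List.enumerate_cons, pvGr, hi, ih (i + 1) _ (by omega)]

theorem pvG_tall_run (height x : Int) (run t : List Int)
    (hx : x ≥ height) (h : ∀ y ∈ run, y ≥ height) (c : Bool) :
    pvG height (x :: (run ++ t)) c = (x :: run) ++ pvG height t true := by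
  induction run generalizing x c with
  | nil => simp [pvG, hx]
  | cons y ys ih =>
      have hy : y ≥ height := h y (by simp)
      have hih := ih y hy (fun z hz => h z (List.mem_cons_of_mem _ hz)) true
      simp only [pvG, if_pos hx, if_pos hy, List.cons_append] at hih ⊢
      simp [hih]

theorem pvG_short_run (height : Int) (run t : List Int)
    (h : ∀ y ∈ run, ¬ y ≥ height) :
    pvG height (run ++ t) false = pvG height t false := by
  induction run with
  | nil => rfl
  | cons x xs ih =>
      have hx : ¬ x ≥ height := h x (by simp)
      simp [pvG, hx, ih (fun y hy => h y (List.mem_cons_of_mem _ hy))]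

-- pvG ignores the flag when the list is empty or starts tall
theorem pvG_flag_irrel (height : Int) (t : List Int)
    (h : t = [] ∨ ∃ x xs, t = x :: xs ∧ x ≥ height) (c : Bool) :
    pvG height t c = pvG height t true := by
  rcases h with h | ⟨x, xs, rfl, hx⟩
  · subst h; rfl
  · simp [pvG, hx]

theorem pvDropWhile_head (p : Int → Bool) (xs : List Int) :
    xs.dropWhile p = [] ∨ ∃ y ys, xs.dropWhile p = y :: ys ∧ p y = false := by
  induction xs with
  | nil => left; rfl
  | cons x xs ih =>
      by_cases hx : p x = true
      · simpa [List.dropWhile, hx] using ih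
      · right; exact ⟨x, xs, by simp [List.dropWhile, hx], by simpa using hx⟩

-- after dropping a short run, the remainder is empty or starts tall
theorem pvDrop_ok (height : Int) (xs : List Int) :
    (xs.dropWhile (fun y => decide (y ≥ height) == false)) = [] ∨
    ∃ y ys, (xs.dropWhile (fun y => decide (y ≥ height) == false)) = y :: ys ∧ y ≥ height := by
  rcases pvDropWhile_head (fun y => decide (y ≥ height) == false) xs with h | ⟨y, ys, hy, hpy⟩
  · left; exact h
  · right
    refine ⟨y, ys, hy, ?_⟩
    simp at hpy
    exact hpy

theorem pvTake_tall (height : Int) (xs : List Int) :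
    ∀ y ∈ xs.takeWhile (fun y => decide (y ≥ height) == true), y ≥ height := by
  intro y hy
  have := List.mem_takeWhile_imp hy
  simpa using this

theorem pvTake_short (height : Int) (xs : List Int) :
    ∀ y ∈ xs.takeWhile (fun y => decide (y ≥ height) == false), ¬ y ≥ height := by
  intro y hy
  have := List.mem_takeWhile_imp hy
  simp at this
  omega

-- core: run processing of the groupby equals pvG with flag true
theorem pvGr_groupby (height : Int) (fence : List Int) :
    pvGr (pvGroupby (fun f => f ≥ height) fence) = pvG height fence true := by
  induction fence using pvGroupby.induct (k := fun f => decide (f ≥ height)) with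
  | case1 => simp [pvGroupby, pvGr, pvG]
  | case2 x xs ih =>
      rw [pvGroupby]
      by_cases hx : x ≥ height
      · have hkx : decide (x ≥ height) = true := by simpa using hx
        rw [hkx] at ih ⊢
        simp only [pvGr]
        rw [ih]
        conv_rhs => rw [show x :: xs = x :: (xs.takeWhile (fun y => decide (y ≥ height) == true) ++ xs.dropWhile (fun y => decide (y ≥ height) == true)) from by rw [List.takeWhile_append_dropWhile]]
        rw [pvG_tall_run height x _ _ hx (pvTake_tall height xs) true]
      · have hkx : decide (x ≥ height) = false := by simpa using hx
        rw [hkx] at ih ⊢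
        simp only [pvGr]
        rw [ih]
        have hrhs : pvG height (x :: xs) true = 0 :: pvG height xs false := by
          simp [pvG, hx]
        rw [hrhs]
        have hxs : pvG height xs false
            = pvG height (xs.dropWhile (fun y => decide (y ≥ height) == false)) false := by
          conv_lhs => rw [show xs = xs.takeWhile (fun y => decide (y ≥ height) == false) ++ xs.dropWhile (fun y => decide (y ≥ height) == false) from (List.takeWhile_append_dropWhile).symm]
          exact pvG_short_run height _ _ (pvTake_short height xs)
        rw [hxs, pvG_flag_irrel height _ (pvDrop_ok height xs) false]

theorem pvB_eq_pvG (height : Int) (fence : List Int) :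
    make_smaller_fence_alt fence height = pvG height fence false := by
  unfold make_smaller_fence_alt
  cases fence with
  | nil => simp [pvGroupby, pvG, PySem.List.enumerate_nil]
  | cons x xs =>
      rw [pvGroupby, PySem.List.enumerate_cons]
      by_cases hx : x ≥ height
      · have hkx : decide (x ≥ height) = true := by simpa using hx
        rw [hkx]
        simp only [List.foldl_cons]
        rw [pvB_fold_tail _ _ _ (by norm_num), pvGr_groupby]
        conv_rhs => rw [show x :: xs = x :: (xs.takeWhile (fun y => decide (y ≥ height) == true) ++ xs.dropWhile (fun y => decide (y ≥ height) == true)) from by rw [List.takeWhile_append_dropWhile]]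
        rw [pvG_tall_run height x _ _ hx (pvTake_tall height xs) false]
        simp
      · have hkx : decide (x ≥ height) = false := by simpa using hx
        rw [hkx]
        simp only [List.foldl_cons]
        norm_num
        rw [pvB_fold_tail _ _ _ (by norm_num), pvGr_groupby]
        have hrhs : pvG height (x :: xs) false = pvG height xs false := by
          simp [pvG, hx]
        rw [hrhs]
        have hxs : pvG height xs false
            = pvG height (xs.dropWhile (fun y => decide (y ≥ height) == false)) false := by
          conv_lhs => rw [show xs = xs.takeWhile (fun y => decide (y ≥ height) == false) ++ xs.dropWhile (fun y => decide (y ≥ height) == false) from (List.takeWhile_append_dropWhile).symm]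
          exact pvG_short_run height _ _ (pvTake_short height xs)
        rw [hxs, pvG_flag_irrel height _ (pvDrop_ok height xs) false]
        simp

-- ===== VERDICT (by name: the statement is the Claim_ definition above) =====
theorem make_smaller_fence_spec : Claim_equal_make_smaller_fence := by
  intro fence height _
  unfold Spec_make_smaller_fence make_smaller_fence
  rw [pvA_foldl, pvB_eq_pvG]
  simp
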